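-- pv_equiv track=rewrite | github.com/kumadesu0709/NEA-project | generate all combinations.py | pick_rooms
-- ===== SOURCE A (Python) =====
-- def check_existed_pupil(room_one, room_two):
--     for student_one in room_one:
--         if student_one in room_two:
--             return True
--     return False
--
-- def pick_rooms(rooms:list, no_of_rooms:int):
--     result = []
--     def backtrack(start, comb):
--         if len(comb) == no_of_rooms:
--             result.append(comb.copy())
--             return
--         for i in range(start, len(rooms)):
--             have_existed = False
--             for existed_room in comb:
--                 if check_existed_pupil(rooms[i], existed_room):
--                     have_existed = True
--                     break
--             if have_existed == False:
--                 comb.append(rooms[i])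
--                 backtrack(i+1,comb)
--                 comb.pop()
--
--     backtrack(0,[])
--     return result
-- ===== SOURCE B (Python) =====
-- def pick_rooms(rooms: list, no_of_rooms: int):
--     # Functional backtracking that carries the SET of already-used pupils,
--     # so each candidate room is checked by one O(|room|) disjointness test
--     # instead of rescanning every chosen room pupil-by-pupil.
--     def go(rest, chosen, used):
--         if len(chosen) == no_of_rooms:
--             return [chosen]
--         if not rest:
--             return []
--         room = rest[0]
--         tail = rest[1:]
--         with_room = (
--             go(tail, chosen + [room], used | set(room))
--             if used.isdisjoint(room) else []
--         )
--         return with_room + go(tail, chosen, used)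
--     return go(rooms, [], set())
-- ===== Notes on version B (the rewrite author's own statement) =====
-- stated objective: faster
-- what changed: Replaces the mutating backtracker whose conflict test rescans every chosen room pupil-by-pupil (list membership inside two nested loops) with a pure recursive enumerator that threads the set of already-used pupils, deciding each candidate room by one hashed set-disjointness test.
import Mathlib
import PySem

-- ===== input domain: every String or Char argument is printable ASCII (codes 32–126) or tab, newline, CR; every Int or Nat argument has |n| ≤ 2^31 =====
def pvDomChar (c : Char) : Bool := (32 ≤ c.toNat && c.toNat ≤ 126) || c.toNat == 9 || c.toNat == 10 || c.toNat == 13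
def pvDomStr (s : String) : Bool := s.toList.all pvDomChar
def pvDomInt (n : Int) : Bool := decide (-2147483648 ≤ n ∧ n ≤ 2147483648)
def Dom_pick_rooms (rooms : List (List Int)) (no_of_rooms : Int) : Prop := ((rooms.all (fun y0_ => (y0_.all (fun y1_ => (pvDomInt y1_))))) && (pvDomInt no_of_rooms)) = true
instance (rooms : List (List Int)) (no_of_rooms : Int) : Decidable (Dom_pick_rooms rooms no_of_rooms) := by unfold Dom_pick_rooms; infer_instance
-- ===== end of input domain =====

-- B replaces A's per-candidate rescan of all chosen rooms by one disjointness test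
-- against a threaded set of already-used pupils (objective: alternative algorithm).

-- ===== PORT A =====
def check_existed_pupil : List Int → List Int → Bool
  | [], _ => false
  | student_one :: rest, room_two =>
    if room_two.contains student_one then true else check_existed_pupil rest room_two

-- the inner 'for existed_room in comb: … break' loop computing have_existed
def pickHaveExisted (room : List Int) : List (List Int) → Bool
  | [] => false
  | existed_room :: rest =>
    if check_existed_pupil room existed_room then true else pickHaveExisted room rest

mutual
-- backtrack(start, comb); the suffix list stands for the indices range(start, len(rooms))
def pickBacktrack (k : Int) (comb : List (List Int)) : List (List Int) → List (List (List Int))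
  | rest =>
    if (comb.length : Int) = k then [comb]
    else pickLoop k comb rest
  termination_by rest => (rest.length, 1)
-- the 'for i in range(start, len(rooms))' loop body
def pickLoop (k : Int) (comb : List (List Int)) : List (List Int) → List (List (List Int))
  | [] => []
  | r :: rest =>
    (if pickHaveExisted r comb = false then pickBacktrack k (comb ++ [r]) rest else [])
      ++ pickLoop k comb rest
  termination_by rest => (rest.length, 0)
end

def pick_rooms (rooms : List (List Int)) (no_of_rooms : Int) : List (List (List Int)) :=
  pickBacktrack no_of_rooms [] rooms

-- ===== PORT B =====
def altGo (k : Int) : List (List Int) → List (List Int) → PySem.Set Int → List (List (List Int))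
  | rest, chosen, used =>
    if (chosen.length : Int) = k then [chosen]
    else
      match rest with
      | [] => []
      | room :: tail =>
        (if PySem.Set.isdisjoint used room then
            altGo k tail (chosen ++ [room]) (PySem.Set.union used (PySem.Set.ofList room))
         else [])
          ++ altGo k tail chosen used
termination_by rest _ _ => rest.length

def pick_rooms_alt (rooms : List (List Int)) (no_of_rooms : Int) : List (List (List Int)) :=
  altGo no_of_rooms rooms [] PySem.Set.empty

-- ===== PRECONDITION & SPEC =====
def Spec_pick_rooms (rooms : List (List Int)) (no_of_rooms : Int) (out : List (List (List Int))) : Prop := out = pick_rooms_alt rooms no_of_rooms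
instance (rooms : List (List Int)) (no_of_rooms : Int) (out : List (List (List Int))) : Decidable (Spec_pick_rooms rooms no_of_rooms out) := by unfold Spec_pick_rooms; infer_instance

-- ===== CLAIM (what is proved, stated in full; the proofs are below) =====
def Claim_equal_pick_rooms : Prop := ∀ (rooms : List (List Int)) (no_of_rooms : Int), Dom_pick_rooms rooms no_of_rooms → Spec_pick_rooms rooms no_of_rooms (pick_rooms rooms no_of_rooms)

-- ===== LEMMAS AND PROOFS =====

theorem check_existed_iff (r1 r2 : List Int) :
    check_existed_pupil r1 r2 = true ↔ ∃ s ∈ r1, s ∈ r2 := by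
  induction r1 with
  | nil => simp [check_existed_pupil]
  | cons a t ih =>
    simp only [check_existed_pupil]
    by_cases h : r2.contains a = true
    · simp only [if_pos h, true_iff]
      exact ⟨a, List.mem_cons_self, List.contains_iff_mem.mp h⟩
    · rw [if_neg h, ih]
      constructor
      · rintro ⟨s, hs1, hs2⟩; exact ⟨s, List.mem_cons_of_mem _ hs1, hs2⟩
      · rintro ⟨s, hs1, hs2⟩
        cases List.mem_cons.1 hs1 with
        | inl hc => exact absurd (List.contains_iff_mem.mpr (hc ▸ hs2)) h
        | inr ht => exact ⟨s, ht, hs2⟩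

theorem haveExisted_iff (room : List Int) (comb : List (List Int)) :
    pickHaveExisted room comb = true ↔ ∃ ex ∈ comb, ∃ s ∈ room, s ∈ ex := by
  induction comb with
  | nil => simp [pickHaveExisted]
  | cons c t ih =>
    simp only [pickHaveExisted]
    by_cases h : check_existed_pupil room c
    · rcases (check_existed_iff room c).1 h with ⟨s, hs1, hs2⟩
      simp only [h, if_true, true_iff]
      exact ⟨c, by simp, s, hs1, hs2⟩
    · rw [if_neg h, ih]
      constructor
      · rintro ⟨ex, hex, hs⟩
        exact ⟨ex, List.mem_cons_of_mem _ hex, hs⟩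
      · rintro ⟨ex, hex, s, hs1, hs2⟩
        cases List.mem_cons.1 hex with
        | inl hc =>
          exact absurd ((check_existed_iff room c).2 ⟨s, hs1, hc ▸ hs2⟩) (by simp [h])
        | inr ht => exact ⟨ex, ht, s, hs1, hs2⟩

-- the used-set invariant and the main correspondence
theorem main_equiv (k : Int) (rest : List (List Int)) :
    ∀ (comb : List (List Int)) (used : PySem.Set Int),
      (∀ s : Int, s ∈ used ↔ ∃ room ∈ comb, s ∈ room) →
      pickBacktrack k comb rest = altGo k rest comb used ∧
      ((comb.length : Int) ≠ k → pickLoop k comb rest = altGo k rest comb used) := by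
  induction rest with
  | nil =>
    intro comb used _
    constructor
    · rw [pickBacktrack, altGo]
      by_cases h : (comb.length : Int) = k <;> simp [h, pickLoop]
    · intro h; rw [pickLoop, altGo]; simp [h]
  | cons room tail ih =>
    intro comb used hinv
    have hcond : pickHaveExisted room comb = false ↔ PySem.Set.isdisjoint used room = true := by
      rw [PySem.Set.isdisjoint_iff]
      constructor
      · intro h x hxu hxr
        rcases (hinv x).1 hxu with ⟨rm, hrm, hx⟩
        have : pickHaveExisted room comb = true :=
          (haveExisted_iff room comb).2 ⟨rm, hrm, x, hxr, hx⟩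
        simp [this] at h
      · intro h
        cases he : pickHaveExisted room comb with
        | false => rfl
        | true =>
          rcases (haveExisted_iff room comb).1 he with ⟨ex, hex, s, hsr, hse⟩
          exact absurd hsr (h s ((hinv s).2 ⟨ex, hex, hse⟩))
    have hloop : (comb.length : Int) ≠ k →
        pickLoop k comb (room :: tail) = altGo k (room :: tail) comb used := by
      intro hne
      rw [pickLoop, altGo]
      simp only [hne]
      have htail : pickLoop k comb tail = altGo k tail comb used :=
        (ih comb used hinv).2 hne
      by_cases hd : PySem.Set.isdisjoint used room = true
      · have hhe : pickHaveExisted room comb = false := hcond.2 hd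
        have hinv' : ∀ s : Int,
            s ∈ PySem.Set.union used (PySem.Set.ofList room) ↔
              ∃ rm ∈ comb ++ [room], s ∈ rm := by
          intro s
          rw [PySem.Set.mem_union]
          simp [PySem.Set.mem_ofList, hinv s]
          constructor
          · rintro (⟨rm, h1, h2⟩ | h) ; exacts [⟨rm, Or.inl h1, h2⟩, ⟨room, Or.inr rfl, h⟩]
          · rintro ⟨rm, h1 | rfl, h2⟩ ; exacts [Or.inl ⟨rm, h1, h2⟩, Or.inr h2]
        have hb := (ih (comb ++ [room]) (PySem.Set.union used (PySem.Set.ofList room)) hinv').1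
        simp [hd, hhe, hb, htail]
      · have hhe : pickHaveExisted room comb = true := by
          cases he : pickHaveExisted room comb with
          | true => rfl
          | false => exact absurd (hcond.1 he) hd
        simp [hd, hhe, htail]
    refine ⟨?_, hloop⟩
    rw [pickBacktrack]
    by_cases h : (comb.length : Int) = k
    · rw [altGo]; simp [h]
    · rw [if_neg h]; exact hloop h

-- ===== VERDICT (by name: the statement is the Claim_ definition above) =====
theorem pick_rooms_spec : Claim_equal_pick_rooms := by
  intro rooms no_of_rooms _
  show pick_rooms rooms no_of_rooms = pick_rooms_alt rooms no_of_rooms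
  exact (main_equiv no_of_rooms rooms [] PySem.Set.empty (by simp [PySem.Set.empty])).1
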